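-- pv_equiv track=rewrite | github.com/VarunAIFund/ai-link | sync_sheet_with_candidates.py | distribute_emails
-- ===== SOURCE A (Python) =====
-- from typing import List, Dict, Set, Tuple, Optional
--
-- def distribute_emails(all_emails: List[str], column_mapping: Dict[str, int], num_columns: int) -> Dict[str, str]:
--     """
--     Distribute candidate emails across available email columns
--
--     Args:
--         all_emails: List of email addresses from candidate
--         column_mapping: Dictionary mapping field names to column indices
--         num_columns: Total number of columns in the sheet
--
--     Returns:
--         Dictionary mapping column indices to email values
--     """
--     email_distribution = {}
--
--     if not all_emails:
--         return email_distribution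
--
--     # Available email columns in order of preference
--     email_columns = [
--         ('email', column_mapping.get('email')),          # Primary email column (E)
--         ('email_2', 5),                                  # Column F (index 5)
--         ('email_3', 6)                                   # Column G (index 6)
--     ]
--
--     # Distribute emails across available columns
--     email_index = 0
--     for field_name, col_index in email_columns:
--         if email_index < len(all_emails) and col_index is not None and col_index < num_columns:
--             email_distribution[col_index] = all_emails[email_index]
--             email_index += 1
--
--     return email_distribution
-- ===== SOURCE B (Python) =====
-- from typing import List, Dict
--
-- def distribute_emails(all_emails: List[str], column_mapping: Dict[str, int], num_columns: int) -> Dict[str, str]: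
--     def assign(cols, emails):
--         # recursion on both lists at once: stops when either runs out,
--         # skips an invalid column without consuming an email
--         if not cols or not emails:
--             return []
--         col = cols[0]
--         if col is None or col >= num_columns:
--             return assign(cols[1:], emails)
--         return [(col, emails[0])] + assign(cols[1:], emails[1:])
--     return dict(assign([column_mapping.get('email'), 5, 6], all_emails))
-- ===== Notes on version B (the rewrite author's own statement) =====
-- stated objective: simpler
-- what changed: Replaces A's imperative loop over fixed column pairs with a stateful email_index counter by a recursion that descends on the column list and the email list simultaneously, emitting (column, email) pairs and building the dict once at the end.
import Mathlib
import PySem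

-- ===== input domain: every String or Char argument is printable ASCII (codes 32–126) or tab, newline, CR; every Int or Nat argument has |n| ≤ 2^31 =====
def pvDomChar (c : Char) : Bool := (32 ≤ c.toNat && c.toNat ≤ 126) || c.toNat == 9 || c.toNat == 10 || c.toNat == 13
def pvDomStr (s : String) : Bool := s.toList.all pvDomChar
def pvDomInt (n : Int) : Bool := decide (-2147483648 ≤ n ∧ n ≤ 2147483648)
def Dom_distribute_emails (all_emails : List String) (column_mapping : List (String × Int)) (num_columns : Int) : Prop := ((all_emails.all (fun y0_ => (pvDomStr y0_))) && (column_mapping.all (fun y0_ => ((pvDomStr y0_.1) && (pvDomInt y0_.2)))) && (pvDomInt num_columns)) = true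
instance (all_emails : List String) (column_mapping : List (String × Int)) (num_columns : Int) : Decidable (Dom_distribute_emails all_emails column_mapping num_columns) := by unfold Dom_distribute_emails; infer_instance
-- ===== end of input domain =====

-- B replaces A's imperative loop with a stateful email_index counter by a
-- recursion descending on the column list and the email list simultaneously,
-- producing the assignment pairs directly; simpler decomposition, same result.

-- ===== PORT A =====
-- Literal port of A: early return on empty input, then a fold over the three
-- (field, col?) preference pairs carrying (dict, email_index) as state.
def distribute_emails (all_emails : List String) (column_mapping : List (String × Int)) (num_columns : Int) : List (Int × String) :=
  let email_distribution : PySem.Dict Int String := PySem.Dict.empty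
  if all_emails = [] then email_distribution.items
  else
    let email_columns : List (String × Option Int) :=
      [("email", (PySem.Dict.ofList column_mapping).get? "email"),
       ("email_2", some 5),
       ("email_3", some 6)]
    let final := email_columns.foldl
      (fun (st : PySem.Dict Int String × Int) p =>
        if st.2 < PySem.List.len all_emails then
          match p.2 with
          | some col_index =>
            if col_index < num_columns then
              (st.1.insert col_index (PySem.List.pyGetD all_emails st.2 ""), st.2 + 1)
            else st
          | none => st
        else st)
      (email_distribution, 0)
    final.1.items

-- ===== PORT B =====
-- Source B's inner 'assign': recursion on (cols, emails); an invalid column is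
-- skipped without consuming an email, a valid one emits a pair and consumes one.
def pvAssign (num_columns : Int) : List (Option Int) → List String → List (Int × String)
  | [], _ => []
  | _ :: _, [] => []
  | c :: cs, e :: es =>
    match c with
    | none => pvAssign num_columns cs (e :: es)
    | some col =>
      if num_columns ≤ col then pvAssign num_columns cs (e :: es)
      else (col, e) :: pvAssign num_columns cs es

def distribute_emails_alt (all_emails : List String) (column_mapping : List (String × Int)) (num_columns : Int) : List (Int × String) :=
  (PySem.Dict.ofList
    (pvAssign num_columns
      [(PySem.Dict.ofList column_mapping).get? "email", some 5, some 6]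
      all_emails)).items

-- ===== PRECONDITION & SPEC =====
def Spec_distribute_emails (all_emails : List String) (column_mapping : List (String × Int)) (num_columns : Int) (out : List (Int × String)) : Prop := out = distribute_emails_alt all_emails column_mapping num_columns
instance (all_emails : List String) (column_mapping : List (String × Int)) (num_columns : Int) (out : List (Int × String)) : Decidable (Spec_distribute_emails all_emails column_mapping num_columns out) := by unfold Spec_distribute_emails; infer_instance

-- ===== CLAIM (what is proved, stated in full; the proofs are below) =====
def Claim_equal_distribute_emails : Prop := ∀ (all_emails : List String) (column_mapping : List (String × Int)) (num_columns : Int), Dom_distribute_emails all_emails column_mapping num_columns → Spec_distribute_emails all_emails column_mapping num_columns (distribute_emails all_emails column_mapping num_columns)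

-- ===== LEMMAS AND PROOFS =====

-- step function of A's loop (proof-side helper)
def pvStep (all_emails : List String) (num_columns : Int)
    (st : PySem.Dict Int String × Int) (p : String × Option Int) :
    PySem.Dict Int String × Int :=
  if st.2 < PySem.List.len all_emails then
    match p.2 with
    | some col_index =>
      if col_index < num_columns then
        (st.1.insert col_index (PySem.List.pyGetD all_emails st.2 ""), st.2 + 1)
      else st
    | none => st
  else st

-- the valid target columns of a preference list (proof-side helper)
def pvValid (num_columns : Int) (cols : List (Option Int)) : List Int :=
  cols.filterMap (fun c => match c with
    | some col => if col < num_columns then some col else none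
    | none => none)

-- A's fold, started at email index i, adds exactly the valid columns zipped
-- with the remaining emails.
lemma pvFold_eq (all_emails : List String) (num_columns : Int)
    (cols : List (String × Option Int)) (d : PySem.Dict Int String) (i : Int)
    (hi : 0 ≤ i) :
    (cols.foldl (pvStep all_emails num_columns) (d, i)).1
      = d.update ((pvValid num_columns (cols.map Prod.snd)).zip (all_emails.drop i.toNat)) := by
  induction cols generalizing d i with
  | nil => simp [pvValid, PySem.Dict.update]
  | cons p rest ih =>
    rcases p with ⟨name, copt⟩
    by_cases hlen : i < PySem.List.len all_emails
    · cases copt with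
      | none =>
        simp only [List.foldl_cons, pvStep, hlen, ite_true]
        rw [ih d i hi]
        simp [pvValid]
      | some col =>
        by_cases hc : col < num_columns
        · simp only [List.foldl_cons, pvStep, hlen, hc, ite_true]
          rw [ih _ _ (by omega)]
          have hdrop : all_emails.drop i.toNat
              = PySem.List.pyGetD all_emails i "" :: all_emails.drop (i + 1).toNat := by
            have hlt : i.toNat < all_emails.length := by
              simp [PySem.List.len_eq] at hlen; omega
            rw [List.drop_eq_getElem_cons hlt]
            congr 1
            · rw [PySem.List.pyGetD_eq_getElem all_emails "" hi
                (by simp [PySem.List.len_eq] at hlen; omega)]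
            · congr 1; omega
          rw [hdrop]
          simp [pvValid, hc, PySem.Dict.update]
        · simp only [List.foldl_cons, pvStep, hlen, hc, ite_true, ite_false]
          rw [ih d i hi]
          simp [pvValid, hc]
    · have hstay : rest.foldl (pvStep all_emails num_columns) (d, i) = (d, i) := by
        clear ih
        induction rest with
        | nil => rfl
        | cons q t iht => simp only [List.foldl_cons, pvStep, hlen, ite_false]; exact iht
      have hdrop : all_emails.drop i.toNat = [] := by
        apply List.drop_eq_nil_of_le
        simp [PySem.List.len_eq] at hlen; omega
      simp only [List.foldl_cons, pvStep, hlen]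
      cases copt <;> simp [hstay, hdrop, PySem.Dict.update]

-- B's recursion computes exactly the valid columns zipped with the emails.
lemma pvAssign_eq (num_columns : Int) (cols : List (Option Int)) (emails : List String) :
    pvAssign num_columns cols emails = (pvValid num_columns cols).zip emails := by
  induction cols generalizing emails with
  | nil => simp [pvAssign, pvValid]
  | cons c cs ih =>
    cases emails with
    | nil =>
      cases c with
      | none => simp [pvAssign, pvValid, ih]
      | some col => by_cases h : col < num_columns <;>
          simp [pvAssign, pvValid, h, ih, not_le.mpr, le_of_not_gt]
    | cons e es =>
      cases c with
      | none => simp [pvAssign, pvValid, ih]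
      | some col =>
        by_cases h : col < num_columns
        · simp [pvAssign, pvValid, h, not_le.mpr h, ih]
        · simp [pvAssign, pvValid, h, le_of_not_gt h, ih]

-- ===== VERDICT (by name: the statement is the Claim_ definition above) =====
theorem distribute_emails_spec : Claim_equal_distribute_emails := by
  intro all_emails column_mapping num_columns _
  unfold Spec_distribute_emails distribute_emails distribute_emails_alt
  rw [pvAssign_eq]
  rcases all_emails with _ | ⟨a, t⟩
  · simp [PySem.Dict.ofList, PySem.Dict.update, PySem.Dict.empty]
  · simp only [if_neg (List.cons_ne_nil a t)]
    rw [show (fun (st : PySem.Dict Int String × Int) p =>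
        if st.2 < PySem.List.len (a :: t) then
          match p.2 with
          | some col_index =>
            if col_index < num_columns then
              (st.1.insert col_index (PySem.List.pyGetD (a :: t) st.2 ""), st.2 + 1)
            else st
          | none => st
        else st) = pvStep (a :: t) num_columns from rfl]
    rw [pvFold_eq (a :: t) num_columns _ PySem.Dict.empty 0 le_rfl]
    rfl
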